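-- pv_equiv track=rewrite | github.com/JWierzbix/Metody-Numeryczne | algorytm_Hornera_dzielenia_wielomianu_przez_dwumian.py | Wierzbicki_Jakub_horner2
-- ===== SOURCE A (Python) =====
-- def Wierzbicki_Jakub_horner2(a,c):
--     #tworzymy tablice wynikowa
--     B = [0]*len(a)
--     B[0] = a[0]
--     for i in range(1,len(a)):
--         B[i]= a[i] + c * B[i-1]
--     wynik = "W(x)= "
--     for i in range(len(a)-1):
--         if i==len(a)-2:
--             wynik += " ({})".format(B[i], len(a) - 2 - i)
--             break
--         wynik += " ({})x^{} +".format(B[i],len(a)-2-i)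
--     return wynik + " ,reszta= {}".format(B[len(a)-1])
-- ===== SOURCE B (Python) =====
-- def Wierzbicki_Jakub_horner2(a, c):
--     # single recursive pass: carry the running Horner value, emit each term as it is computed
--     def go(b, rest):
--         if not rest:
--             return " ,reszta= {}".format(b)
--         if len(rest) == 1:
--             return " ({})".format(b) + go(rest[0] + c * b, rest[1:])
--         return " ({})x^{} +".format(b, len(rest) - 1) + go(rest[0] + c * b, rest[1:])
--     return "W(x)= " + go(a[0], a[1:])
-- ===== Notes on version B (the rewrite author's own statement) =====
-- stated objective: simpler
-- what changed: Replaces A's two index-driven loops (building a coefficient array B by subscript assignment, then a second formatting loop over indices with a break) by one recursive pass that carries the running Horner value and emits each formatted term (or the remainder) as the value is computed.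
import Mathlib
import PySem

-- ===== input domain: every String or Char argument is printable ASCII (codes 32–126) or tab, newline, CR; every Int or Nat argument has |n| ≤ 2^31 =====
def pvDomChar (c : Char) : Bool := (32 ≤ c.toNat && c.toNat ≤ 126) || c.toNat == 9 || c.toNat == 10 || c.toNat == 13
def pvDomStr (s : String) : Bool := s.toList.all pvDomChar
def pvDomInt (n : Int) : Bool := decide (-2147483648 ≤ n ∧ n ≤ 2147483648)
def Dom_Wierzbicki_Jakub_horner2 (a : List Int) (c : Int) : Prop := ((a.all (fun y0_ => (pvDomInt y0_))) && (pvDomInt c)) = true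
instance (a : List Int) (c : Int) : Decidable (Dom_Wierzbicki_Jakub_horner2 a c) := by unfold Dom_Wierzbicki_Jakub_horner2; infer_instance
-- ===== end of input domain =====

-- B replaces A's index-array loop plus separate formatting loop by one recursive pass that
-- carries the running Horner value and emits each term as it is computed (objective: simpler).

-- ===== PORT A =====
-- Transliteration of A.  Python's `break` at i == len(a)-2 fires on the LAST index of
-- range(len(a)-1), so the fold over the whole range is the same computation.
-- B = [0]*len(a); B[0] = a[0]; for i in range(1,len(a)): B[i] = a[i] + c*B[i-1]
-- (a[0]/B[0] raise IndexError on empty a: excluded by Pre_; loop indices are always in range)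
def pvBuildB (a : List Int) (c : Int) : List Int :=
  (PySem.List.pyRange 1 (a.length : Int) 1).foldl
    (fun B i => PySem.List.pySetD B i
      (PySem.List.pyGetD a i 0 + c * PySem.List.pyGetD B (i - 1) 0))
    (PySem.List.pySetD (List.replicate a.length 0) 0 (PySem.List.pyGetD a 0 0))

def Wierzbicki_Jakub_horner2 (a : List Int) (c : Int) : String :=
  ((PySem.List.pyRange 0 ((a.length : Int) - 1) 1).foldl
    (fun w i =>
      if i = (a.length : Int) - 2 then
        w ++ " (" ++ PySem.Int.toStr (PySem.List.pyGetD (pvBuildB a c) i 0) ++ ")"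
      else
        w ++ " (" ++ PySem.Int.toStr (PySem.List.pyGetD (pvBuildB a c) i 0) ++ ")x^"
          ++ PySem.Int.toStr ((a.length : Int) - 2 - i) ++ " +")
    "W(x)= ")
  ++ " ,reszta= " ++ PySem.Int.toStr (PySem.List.pyGetD (pvBuildB a c) ((a.length : Int) - 1) 0)

-- ===== PORT B =====
-- go(b, rest) from Source B: emit the term for the current Horner value b, recurse on the rest.
def pvAltGo (c b : Int) : List Int → String
  | [] => " ,reszta= " ++ PySem.Int.toStr b
  | [x] => " (" ++ PySem.Int.toStr b ++ ")" ++ pvAltGo c (x + c * b) []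
  | x :: y :: tl =>
      " (" ++ PySem.Int.toStr b ++ ")x^" ++ PySem.Int.toStr (((x :: y :: tl).length : Int) - 1)
        ++ " +" ++ pvAltGo c (x + c * b) (y :: tl)

def Wierzbicki_Jakub_horner2_alt (a : List Int) (c : Int) : String :=
  match a with
  | [] => ""   -- Python B raises IndexError on a[0] here; excluded by Pre_
  | x :: xs => "W(x)= " ++ pvAltGo c x xs

-- ===== PRECONDITION & SPEC =====
-- Pre_ excludes only the empty coefficient list, on which the Python A raises IndexError (a[0]).
def Pre_Wierzbicki_Jakub_horner2 (a : List Int) (c : Int) : Prop := a ≠ []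
instance (a : List Int) (c : Int) : Decidable (Pre_Wierzbicki_Jakub_horner2 a c) := by
  unfold Pre_Wierzbicki_Jakub_horner2; infer_instance

def pvWitness_Wierzbicki_Jakub_horner2 : List Int × Int := ([1, 2, 3], 2)

def Spec_Wierzbicki_Jakub_horner2 (a : List Int) (c : Int) (out : String) : Prop := out = Wierzbicki_Jakub_horner2_alt a c
instance (a : List Int) (c : Int) (out : String) : Decidable (Spec_Wierzbicki_Jakub_horner2 a c out) := by unfold Spec_Wierzbicki_Jakub_horner2; infer_instance

-- ===== CLAIM (what is proved, stated in full; the proofs are below) =====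
def Claim_equal_Wierzbicki_Jakub_horner2 : Prop := ∀ (a : List Int) (c : Int), Dom_Wierzbicki_Jakub_horner2 a c → Pre_Wierzbicki_Jakub_horner2 a c → Spec_Wierzbicki_Jakub_horner2 a c (Wierzbicki_Jakub_horner2 a c)

-- ===== LEMMAS AND PROOFS =====

-- The Horner value sequence: hsL c b xs = [b, x1+c*b, …]
def hsL (c b : Int) : List Int → List Int
  | [] => [b]
  | x :: xs => b :: hsL c (x + c * b) xs

theorem hsL_length (c b : Int) (xs : List Int) : (hsL c b xs).length = xs.length + 1 := by
  induction xs generalizing b with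
  | nil => simp [hsL]
  | cons x xs ih => simp [hsL, ih]

theorem hsL_cons_form (c b : Int) (xs : List Int) : ∃ t, hsL c b xs = b :: t := by
  cases xs <;> exact ⟨_, rfl⟩

-- Rendering of a Horner value list: everything but the last element is a term, the last the remainder.
def pvRender : List Int → String
  | [] => ""
  | [b] => " ,reszta= " ++ PySem.Int.toStr b
  | b :: x :: tl =>
      (if tl = [] then " (" ++ PySem.Int.toStr b ++ ")"
       else " (" ++ PySem.Int.toStr b ++ ")x^" ++ PySem.Int.toStr ((tl.length : Int)) ++ " +")
        ++ pvRender (x :: tl)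

theorem altGo_eq_render (c b : Int) (xs : List Int) : pvAltGo c b xs = pvRender (hsL c b xs) := by
  induction xs generalizing b with
  | nil => rfl
  | cons x xs ih =>
    obtain ⟨t, ht⟩ := hsL_cons_form c (x + c * b) xs
    have hlen : t.length = xs.length := by
      have := hsL_length c (x + c * b) xs
      rw [ht] at this; simpa using this
    cases xs with
    | nil =>
      have ht0 : t = [] := by simpa using List.length_eq_zero_iff.mp (by simp [hlen])
      simp [pvAltGo, hsL, pvRender]
    | cons y ys =>
      have ht0 : t ≠ [] := by
        intro h; rw [h] at hlen; simp at hlen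
      have hne : hsL c (y + c * (x + c * b)) ys ≠ [] := by
        obtain ⟨t2, ht2⟩ := hsL_cons_form c (y + c * (x + c * b)) ys; simp [ht2]
      have he : (((x :: y :: ys).length : Nat) : Int) - 1 = ((ys.length + 1 : Nat) : Int) := by
        simp only [List.length_cons]; push_cast; ring
      simp only [pvAltGo, hsL, ih, pvRender, if_neg hne, hsL_length, he]

-- fold of A's array-building loop: starting from pre ++ b :: zeros, it fills in the Horner values.
theorem buildB (a : List Int) (c : Int) :
    ∀ (xs pre : List Int) (b : Int),
      a.drop (pre.length + 1) = xs → pre.length < a.length →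
      (PySem.List.pyRange ((pre.length : Int) + 1) (a.length : Int) 1).foldl
        (fun B i => PySem.List.pySetD B i
          (PySem.List.pyGetD a i 0 + c * PySem.List.pyGetD B (i - 1) 0))
        (pre ++ b :: List.replicate xs.length 0)
      = pre ++ hsL c b xs := by
  intro xs
  induction xs with
  | nil =>
    intro pre b hdrop hlt
    have hlen : a.length = pre.length + 1 := by
      have := congrArg List.length hdrop
      simp at this; omega
    rw [PySem.List.pyRange_one_eq_nil (by omega)]
    simp [hsL]
  | cons x xs ih =>
    intro pre b hdrop hlt
    have hlen : a.length = pre.length + 1 + (xs.length + 1) := by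
      have := congrArg List.length hdrop
      simp at this; omega
    rw [PySem.List.pyRange_one_cons (by omega)]
    simp only [List.foldl_cons]
    have hidx : ((pre.length : Int) + 1) = (((pre.length + 1 : Nat)) : Int) := by push_cast; ring
    have hax : a.getD (pre.length + 1) 0 = x := by
      have h0 : a[pre.length + 1]? = some x := by
        have : (a.drop (pre.length + 1))[0]? = some x := by rw [hdrop]; rfl
        simpa [List.getElem?_drop] using this
      simp [List.getD, h0]
    have hgb : (pre ++ b :: 0 :: List.replicate xs.length 0).getD pre.length 0 = b := by
      have h0 : (pre ++ b :: 0 :: List.replicate xs.length 0)[pre.length]? = some b := by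
        rw [List.getElem?_append_right (le_refl _)]
        simp
      rw [List.getD_eq_getElem?_getD, h0]; rfl
    have hset : (pre ++ b :: 0 :: List.replicate xs.length 0).set (pre.length + 1) (x + c * b)
        = (pre ++ [b]) ++ (x + c * b) :: List.replicate xs.length 0 := by
      rw [show pre ++ b :: 0 :: List.replicate xs.length 0
            = (pre ++ [b]) ++ 0 :: List.replicate xs.length 0 by simp]
      rw [List.set_append_right _ _ (by simp)]
      simp
    rw [hidx]
    simp only [List.length_cons, List.replicate_succ, PySem.List.pySetD_natCast, PySem.List.pyGetD_natCast,
      show ((pre.length + 1 : Nat) : Int) - 1 = ((pre.length : Nat) : Int) by push_cast; ring,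
      hax, hgb, hset]
    have hdrop' : a.drop ((pre ++ [b]).length + 1) = xs := by
      have : a.drop (pre.length + 1 + 1) = xs := by
        have := congrArg (List.drop 1) hdrop
        simpa [List.drop_drop, Nat.add_comm] using this
      simpa [Nat.add_comm] using this
    have := ih (pre ++ [b]) (x + c * b) hdrop' (by simp; omega)
    rw [show (((pre.length + 1 : Nat)) : Int) = (((pre ++ [b]).length : Nat) : Int) by simp, this]
    simp [hsL]
    
-- A's formatting fold over a suffix of the Horner list equals pvRender of that suffix.
theorem strloop (M : List Int) :
    ∀ (L : List Int) (k : Nat) (s : String), M.drop k = L → L ≠ [] →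
      ((PySem.List.pyRange (k : Int) ((M.length : Int) - 1) 1).foldl
        (fun w i =>
          if i = (M.length : Int) - 2 then
            w ++ " (" ++ PySem.Int.toStr (PySem.List.pyGetD M i 0) ++ ")"
          else
            w ++ " (" ++ PySem.Int.toStr (PySem.List.pyGetD M i 0) ++ ")x^"
              ++ PySem.Int.toStr ((M.length : Int) - 2 - i) ++ " +") s)
      ++ " ,reszta= " ++ PySem.Int.toStr (PySem.List.pyGetD M ((M.length : Int) - 1) 0)
      = s ++ pvRender L := by
  intro L
  induction L with
  | nil => intro k s _ hne; exact absurd rfl hne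
  | cons b t ih =>
    intro k s hdrop _
    have hk : k + (t.length + 1) = M.length := by
      have := congrArg List.length hdrop
      simp at this; omega
    have hMk : M.getD k 0 = b := by
      have h0 : M[k]? = some b := by
        have : (M.drop k)[0]? = some b := by rw [hdrop]; rfl
        simpa [List.getElem?_drop] using this
      simp [List.getD, h0]
    cases t with
    | nil =>
      simp only [List.length_nil] at hk
      have hkn : (k : Int) = (M.length : Int) - 1 := by omega
      rw [PySem.List.pyRange_one_eq_nil (by omega)]
      simp only [List.foldl_nil, pvRender, ← hkn, PySem.List.pyGetD_natCast, hMk]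
      simp [String.append_assoc]
    | cons u t' =>
      simp only [List.length_cons] at hk
      rw [PySem.List.pyRange_one_cons (by omega)]
      simp only [List.foldl_cons]
      have hdrop' : M.drop (k + 1) = u :: t' := by
        have := congrArg (List.drop 1) hdrop
        simpa [List.drop_drop, Nat.add_comm] using this
      have hcond : ((k : Int) = (M.length : Int) - 2) ↔ (t' = []) := by
        rw [← List.length_eq_zero_iff]; omega
      have hstep := ih (k + 1) (if t' = [] then s ++ " (" ++ PySem.Int.toStr b ++ ")"
          else s ++ " (" ++ PySem.Int.toStr b ++ ")x^" ++ PySem.Int.toStr ((t'.length : Int)) ++ " +")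
        hdrop' (by simp)
      rw [show ((k : Int) + 1) = (((k + 1 : Nat)) : Int) by push_cast; ring]
      by_cases h' : t' = []
      · rw [if_pos (hcond.mpr h')]
        simp only [PySem.List.pyGetD_natCast, hMk]
        rw [if_pos h'] at hstep
        rw [hstep]
        simp only [pvRender, if_pos h']
        simp [String.append_assoc]
      · rw [if_neg (fun h => h' (hcond.mp h))]
        simp only [PySem.List.pyGetD_natCast, hMk,
          show (M.length : Int) - 2 - (k : Int) = ((t'.length : Nat) : Int) by omega]
        rw [if_neg h'] at hstep
        rw [hstep]
        simp only [pvRender, if_neg h']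
        simp [String.append_assoc]

-- ===== VERDICT (by name: the statement is the Claim_ definition above) =====
theorem pvBuildB_eq_hsL (x c : Int) (xs : List Int) :
    pvBuildB (x :: xs) c = hsL c x xs := by
  unfold pvBuildB
  have hB0 : PySem.List.pySetD (List.replicate (x :: xs).length 0) 0
      (PySem.List.pyGetD (x :: xs) 0 0) = [] ++ x :: List.replicate xs.length 0 := by
    rw [PySem.List.pySetD_of_nonneg _ _ (by norm_num)]
    simp [PySem.List.pyGetD_zero_cons, List.replicate_succ]
  rw [hB0]
  have hbuild := buildB (x :: xs) c xs [] x (by simp) (by simp)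
  simp only [List.length_nil, Nat.cast_zero, zero_add, List.nil_append] at hbuild
  exact hbuild

theorem Wierzbicki_Jakub_horner2_spec : Claim_equal_Wierzbicki_Jakub_horner2 := by
  intro a c _ hpre
  unfold Spec_Wierzbicki_Jakub_horner2
  obtain ⟨x, xs, rfl⟩ := List.exists_cons_of_ne_nil hpre
  unfold Wierzbicki_Jakub_horner2 Wierzbicki_Jakub_horner2_alt
  rw [pvBuildB_eq_hsL]
  have hlen : ((x :: xs).length : Int) = ((hsL c x xs).length : Int) := by
    simp [hsL_length]
  rw [hlen]
  have hstr := strloop (hsL c x xs) (hsL c x xs) 0 "W(x)= " (by simp)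
    (by obtain ⟨t, ht⟩ := hsL_cons_form c x xs; simp [ht])
  rw [show ((0 : Nat) : Int) = (0 : Int) by simp] at hstr
  rw [hstr]
  simp [altGo_eq_render]
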